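-- pv_equiv track=rewrite | github.com/turbodan99/AOC23 | Day12/one.py | list_to_count
-- ===== SOURCE A (Python) =====
-- def list_to_count(listed):
--     return_list = []
--     count = 0
--     process = len(listed)
--     for x in listed:
--         if x == "#":
--             count += 1
--             process -=1
--             if process == 0:
--                 return_list.append(count)
--         else:
--             return_list.append(count)
--             count = 0
--             process -= 1
--     while return_list.count(0) > 0:
--         return_list.remove(0)
--
--     return return_list
-- ===== SOURCE B (Python) =====
-- def list_to_count(listed):
--     res = []
--     count = 0
--     for x in listed:
--         if x == "#":
--             count += 1
--         else:
--             if count: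
--                 res.append(count)
--             count = 0
--     if count:
--         res.append(count)
--     return res
-- ===== Notes on version B (the rewrite author's own statement) =====
-- stated objective: faster
-- what changed: Single O(n) pass that appends only nonzero run lengths directly, replacing A's append-zeros-then-repeated count/remove while-loop.
import Mathlib
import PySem

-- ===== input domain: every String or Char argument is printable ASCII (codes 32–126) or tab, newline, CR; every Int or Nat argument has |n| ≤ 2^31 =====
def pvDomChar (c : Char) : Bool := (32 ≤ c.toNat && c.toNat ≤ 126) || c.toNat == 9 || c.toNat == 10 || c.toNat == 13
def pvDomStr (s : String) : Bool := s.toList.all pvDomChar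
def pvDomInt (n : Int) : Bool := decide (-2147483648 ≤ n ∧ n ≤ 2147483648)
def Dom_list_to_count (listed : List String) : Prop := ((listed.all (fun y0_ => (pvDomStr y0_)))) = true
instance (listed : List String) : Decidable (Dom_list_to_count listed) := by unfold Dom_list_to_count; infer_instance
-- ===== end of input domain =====

-- B replaces A's append-zeros-then-repeated count/remove cleanup with a single pass that
-- appends only nonzero run lengths (objective: faster).

-- ===== PORT A =====
-- A's loop body: state = (return_list, count, process)
def aStep (s : List Int × Int × Int) (x : String) : List Int × Int × Int :=
  if x = "#" then
    if s.2.2 - 1 = 0 then (s.1 ++ [s.2.1 + 1], s.2.1 + 1, s.2.2 - 1)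
    else (s.1, s.2.1 + 1, s.2.2 - 1)
  else (s.1 ++ [s.2.1], 0, s.2.2 - 1)

-- A's cleanup: 'while return_list.count(0) > 0: return_list.remove(0)'
def pvRemoveZeros (l : List Int) : List Int :=
  if PySem.List.count l 0 > 0 then
    match h : PySem.List.remove? l 0 with
    | some l' => pvRemoveZeros l'
    | none => l
  else l
termination_by l.length
decreasing_by
  have hm : (0 : Int) ∈ l := by
    by_contra hc
    rw [(PySem.List.remove?_eq_none_iff l 0).mpr hc] at h
    simp at h
  rw [PySem.List.remove?_eq_some_erase l 0 hm] at h
  cases h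
  have h1 := List.length_erase_of_mem hm
  have h2 : 0 < l.length := List.length_pos_of_mem hm
  omega

def list_to_count (listed : List String) : List Int :=
  pvRemoveZeros (listed.foldl aStep ([], 0, (listed.length : Int))).1

-- ===== PORT B =====
-- B's loop body: state = (res, count)
def bStep (s : List Int × Int) (x : String) : List Int × Int :=
  if x = "#" then (s.1, s.2 + 1)
  else if s.2 ≠ 0 then (s.1 ++ [s.2], 0) else (s.1, 0)

-- B's trailing 'if count: res.append(count)'
def bFlush (s : List Int × Int) : List Int :=
  if s.2 ≠ 0 then s.1 ++ [s.2] else s.1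

def list_to_count_alt (listed : List String) : List Int :=
  bFlush (listed.foldl bStep ([], 0))

-- ===== PRECONDITION & SPEC =====
def Spec_list_to_count (listed : List String) (out : List Int) : Prop := out = list_to_count_alt listed
instance (listed : List String) (out : List Int) : Decidable (Spec_list_to_count listed out) := by unfold Spec_list_to_count; infer_instance

-- ===== CLAIM (what is proved, stated in full; the proofs are below) =====
def Claim_equal_list_to_count : Prop := ∀ (listed : List String), Dom_list_to_count listed → Spec_list_to_count listed (list_to_count listed)

-- ===== LEMMAS AND PROOFS =====

-- what A's loop appends after the already-built prefix, as a structural recursion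
def tailA : List String → Int → List Int
  | [], _ => []
  | x :: xs, c =>
    if x = "#" then (if xs = [] then [c + 1] else tailA xs (c + 1))
    else c :: tailA xs 0

-- what B's loop plus its final flush appends after the already-built prefix
def tailB : List String → Int → List Int
  | [], c => if c ≠ 0 then [c] else []
  | x :: xs, c =>
    if x = "#" then tailB xs (c + 1)
    else if c ≠ 0 then c :: tailB xs 0 else tailB xs 0

theorem foldA_eq (l : List String) : ∀ (ret : List Int) (c : Int),
    (l.foldl aStep (ret, c, (l.length : Int))).1 = ret ++ tailA l c := by
  induction l with
  | nil => intro ret c; simp [tailA]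
  | cons x xs ih =>
    intro ret c
    rw [List.foldl_cons]
    by_cases hx : x = "#"
    · by_cases hxs : xs = []
      · subst hxs
        simp [aStep, hx, tailA]
      · have hne : ((x :: xs).length : Int) - 1 ≠ 0 := by
          have : xs.length ≠ 0 := by simpa using hxs
          simp; omega
        have hstep : aStep (ret, c, ((x :: xs).length : Int)) x
            = (ret, c + 1, (xs.length : Int)) := by
          simp [aStep, hx, hxs]
        rw [hstep, ih]
        simp [tailA, hx, hxs]
    · have hstep : aStep (ret, c, ((x :: xs).length : Int)) x
          = (ret ++ [c], 0, (xs.length : Int)) := by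
        simp [aStep, hx]
      rw [hstep, ih]
      simp [tailA, hx]

theorem foldB_eq (l : List String) : ∀ (res : List Int) (c : Int),
    bFlush (l.foldl bStep (res, c)) = res ++ tailB l c := by
  induction l with
  | nil =>
    intro res c
    by_cases hc : c = 0 <;> simp [bFlush, tailB, hc]
  | cons x xs ih =>
    intro res c
    rw [List.foldl_cons]
    by_cases hx : x = "#"
    · rw [show bStep (res, c) x = (res, c + 1) by simp [bStep, hx], ih]
      simp [tailB, hx]
    · by_cases hc : c = 0
      · rw [show bStep (res, c) x = (res, 0) by simp [bStep, hx, hc], ih]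
        simp [tailB, hx, hc]
      · rw [show bStep (res, c) x = (res ++ [c], 0) by simp [bStep, hx, hc], ih]
        simp [tailB, hx, hc]

theorem filter_erase_zero (l : List Int) :
    (l.erase 0).filter (fun v => v ≠ 0) = l.filter (fun v => v ≠ 0) := by
  induction l with
  | nil => rfl
  | cons a l ih =>
    by_cases ha : a = 0
    · subst ha
      rw [List.erase_cons_head, List.filter_cons]
      simp
    · rw [List.erase_cons_tail (by simpa using ha)]
      rw [List.filter_cons, List.filter_cons, ih]

theorem pvRemoveZeros_eq : ∀ (n : Nat) (l : List Int), l.length ≤ n →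
    pvRemoveZeros l = l.filter (fun v => v ≠ 0) := by
  intro n
  induction n with
  | zero =>
    intro l hl
    have hnil : l = [] := List.eq_nil_of_length_eq_zero (Nat.le_zero.mp hl)
    subst hnil
    rw [pvRemoveZeros]
    simp [PySem.List.count_eq]
  | succ n ih =>
    intro l hl
    rw [pvRemoveZeros]
    by_cases hm : (0 : Int) ∈ l
    · have hcount : PySem.List.count l 0 > 0 := by
        rw [PySem.List.count_eq]; exact List.count_pos_iff.mpr hm
      rw [if_pos hcount]
      have hrem := PySem.List.remove?_eq_some_erase l 0 hm
      have h1 := List.length_erase_of_mem hm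
      have h2 : 0 < l.length := List.length_pos_of_mem hm
      split
      · next l' heq =>
        have hl' : l' = l.erase 0 := by
          rw [hrem] at heq; exact (Option.some.inj heq).symm
        subst hl'
        rw [ih (l.erase 0) (by omega)]
        exact filter_erase_zero l
      · next heq =>
        rw [hrem] at heq
        exact absurd heq (by simp)
    · have hcount : ¬ PySem.List.count l 0 > 0 := by
        rw [PySem.List.count_eq]
        simp [List.count_eq_zero_of_not_mem hm]
      rw [if_neg hcount]
      symm
      apply List.filter_eq_self.mpr
      intro a ha
      simp only [decide_eq_true_eq]
      intro h0; subst h0; exact hm ha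

theorem tail_core : ∀ (l : List String) (c : Int), 0 ≤ c → (l ≠ [] ∨ c = 0) →
    (tailA l c).filter (fun v => v ≠ 0) = tailB l c := by
  intro l
  induction l with
  | nil =>
    intro c _ hd
    have hc : c = 0 := hd.resolve_left (fun h => h rfl)
    simp [tailA, tailB, hc]
  | cons x xs ih =>
    intro c hc _
    by_cases hx : x = "#"
    · by_cases hxs : xs = []
      · subst hxs
        have hne : c + 1 ≠ 0 := by omega
        simp [tailA, tailB, hx, hne]
      · rw [tailA, tailB]
        simp only [hx, if_true, if_neg hxs]
        exact ih (c + 1) (by omega) (Or.inl hxs)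
    · rw [tailA, tailB]
      simp only [if_neg hx]
      rw [List.filter_cons, ih 0 le_rfl (Or.inr rfl)]
      by_cases hc0 : c = 0
      · simp [hc0]
      · simp [hc0]

-- ===== VERDICT (by name: the statement is the Claim_ definition above) =====
theorem list_to_count_spec : Claim_equal_list_to_count := by
  intro listed _
  unfold Spec_list_to_count list_to_count list_to_count_alt
  rw [foldA_eq listed [] 0]
  rw [pvRemoveZeros_eq (([] ++ tailA listed 0).length) _ le_rfl]
  rw [foldB_eq listed [] 0]
  simp only [List.nil_append]
  by_cases h : listed = []
  · subst h; rfl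
  · exact tail_core listed 0 le_rfl (Or.inl h)
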